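-- pv_equiv track=rewrite | github.com/MingRuji6388012/SP2023-PyGress | PythonFiles/indra/b57f55c0/cb2c1ea41503a2c491c23006bc2f214f69730322/cb2c1ea41503a2c491c23006bc2f214f69730322_indra_b57f55c0_20180402_173740_after_1.py | extract_reach_logs
-- ===== SOURCE A (Python) =====
-- def extract_reach_logs(log_str):
--     """Get the list of reach logs from the overall logs."""
--     log_lines = log_str.splitlines()
--     reach_logs = []
--     reach_lines = []
--     adding_reach_lines = False
--     for l in log_lines:
--         if not adding_reach_lines and 'Beginning reach' in l:
--             adding_reach_lines = True
--         elif adding_reach_lines and 'Reach finished' in l: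
--             adding_reach_lines = False
--             reach_logs.append(('SUCCEEDED', '\n'.join(reach_lines)))
--             reach_lines = []
--         elif adding_reach_lines:
--             reach_lines.append(l.split('readers - ')[1])
--     if adding_reach_lines:
--         reach_logs.append(('FAILURE', '\n'.join(reach_lines)))
--     return reach_logs
-- ===== SOURCE B (Python) =====
-- def extract_reach_logs(log_str):
--     """Get the list of reach logs from the overall logs."""
--     lines = iter(log_str.splitlines())
--     reach_logs = []
--     for l in lines:
--         if 'Beginning reach' in l:
--             buf = []
--             for m in lines:
--                 if 'Reach finished' in m:
--                     reach_logs.append(('SUCCEEDED', '\n'.join(buf)))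
--                     break
--                 buf.append(m.split('readers - ')[1])
--             else:
--                 reach_logs.append(('FAILURE', '\n'.join(buf)))
--     return reach_logs
-- ===== Notes on version B (the rewrite author's own statement) =====
-- stated objective: idiomatic
-- what changed: Replaced the boolean-flag state machine over the line list by a nested-loop parse over a shared line iterator: an outer loop seeks the 'Beginning reach' marker and an inner for/else loop collects the block until 'Reach finished', using for/else to record the trailing FAILURE block.
import Mathlib
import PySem

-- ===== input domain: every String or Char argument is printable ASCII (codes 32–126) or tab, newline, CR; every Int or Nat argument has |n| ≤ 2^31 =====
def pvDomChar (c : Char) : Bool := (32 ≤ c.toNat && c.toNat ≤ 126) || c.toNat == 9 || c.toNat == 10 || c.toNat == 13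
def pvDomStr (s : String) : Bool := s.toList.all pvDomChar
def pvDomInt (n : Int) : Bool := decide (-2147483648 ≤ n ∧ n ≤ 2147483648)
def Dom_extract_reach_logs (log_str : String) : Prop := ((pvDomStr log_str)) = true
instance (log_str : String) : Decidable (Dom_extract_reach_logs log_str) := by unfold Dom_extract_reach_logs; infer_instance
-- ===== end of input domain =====

-- B replaces A's boolean-flag state machine by a nested seek/collect parse over the line list (idiomatic for/else in Python);
-- return values agree on every input where A raises no exception (Pre_ excludes the IndexError lines).

-- ===== PORT A =====
-- l.split('readers - ')[1]: Python raises IndexError when 'readers - ' is absent; Pre_ excludes that, the port defaults to "".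
def pvLinePayload (l : String) : String :=
  (((PySem.Str.split? l "readers - ").getD [])[1]?).getD ""

-- A's loop body and final flush, named so the loop-invariant lemma can speak about them
def pvStepA (st : List (String × String) × List String × Bool) (l : String) :
    List (String × String) × List String × Bool :=
  if !st.2.2 && PySem.Str.isIn "Beginning reach" l then
    (st.1, st.2.1, true)
  else if st.2.2 && PySem.Str.isIn "Reach finished" l then
    (st.1 ++ [("SUCCEEDED", PySem.Str.join "\n" st.2.1)], ([] : List String), false)
  else if st.2.2 then
    (st.1, st.2.1 ++ [pvLinePayload l], st.2.2)
  else st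

def pvPost (st : List (String × String) × List String × Bool) : List (String × String) :=
  if st.2.2 then st.1 ++ [("FAILURE", PySem.Str.join "\n" st.2.1)] else st.1

def extract_reach_logs (log_str : String) : List (String × String) :=
  let log_lines := PySem.Str.splitlines log_str
  pvPost (log_lines.foldl pvStepA (([] : List (String × String)), ([] : List String), false))

-- ===== PORT B =====
mutual
-- outer loop: seek a 'Beginning reach' marker line
def pvSeekBegin : List String → List (String × String)
  | [] => []
  | l :: ls =>
    if PySem.Str.isIn "Beginning reach" l then pvCollect ls []
    else pvSeekBegin ls
-- inner loop: collect block lines until 'Reach finished' (for/else: FAILURE on exhaustion)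
def pvCollect : List String → List String → List (String × String)
  | [], buf => [("FAILURE", PySem.Str.join "\n" buf)]
  | m :: ls, buf =>
    if PySem.Str.isIn "Reach finished" m then
      ("SUCCEEDED", PySem.Str.join "\n" buf) :: pvSeekBegin ls
    else pvCollect ls (buf ++ [pvLinePayload m])
end

def extract_reach_logs_alt (log_str : String) : List (String × String) :=
  pvSeekBegin (PySem.Str.splitlines log_str)

-- ===== PRECONDITION & SPEC =====
-- walks the lines with A's on/off flag, checking only marker membership; true iff no interior
-- block line lacks 'readers - ' (exactly where Python A — and B alike — raises IndexError)
def pvNoRaise : Bool → List String → Bool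
  | _, [] => true
  | false, l :: ls => pvNoRaise (PySem.Str.isIn "Beginning reach" l) ls
  | true, l :: ls =>
    if PySem.Str.isIn "Reach finished" l then pvNoRaise false ls
    else PySem.Str.isIn "readers - " l && pvNoRaise true ls

-- Pre_ excludes exactly the inputs on which Python A raises IndexError (a block line without 'readers - ')
def Pre_extract_reach_logs (log_str : String) : Prop :=
  pvNoRaise false (PySem.Str.splitlines log_str) = true
instance (log_str : String) : Decidable (Pre_extract_reach_logs log_str) := by
  unfold Pre_extract_reach_logs; infer_instance

def pvWitness_extract_reach_logs : String :=
  "Beginning reach\nINFO: readers - line one\nReach finished"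

def Spec_extract_reach_logs (log_str : String) (out : List (String × String)) : Prop := out = extract_reach_logs_alt log_str
instance (log_str : String) (out : List (String × String)) : Decidable (Spec_extract_reach_logs log_str out) := by unfold Spec_extract_reach_logs; infer_instance

-- ===== CLAIM (what is proved, stated in full; the proofs are below) =====
def Claim_equal_extract_reach_logs : Prop := ∀ (log_str : String), Dom_extract_reach_logs log_str → Pre_extract_reach_logs log_str → Spec_extract_reach_logs log_str (extract_reach_logs log_str)

-- ===== LEMMAS AND PROOFS =====

-- A's fold, started with flag off resp. on, equals B's two loops (mutual induction on the lines)
theorem pvFoldA_eq (ls : List String) :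
    (∀ logs, pvPost (ls.foldl pvStepA (logs, [], false)) = logs ++ pvSeekBegin ls) ∧
    (∀ logs buf, pvPost (ls.foldl pvStepA (logs, buf, true)) = logs ++ pvCollect ls buf) := by
  induction ls with
  | nil => exact ⟨fun logs => by simp [pvPost, pvSeekBegin],
      fun logs buf => by simp [pvPost, pvCollect]⟩
  | cons l ls ih =>
    refine ⟨fun logs => ?_, fun logs buf => ?_⟩
    · rw [List.foldl_cons]
      have hstep : pvStepA (logs, [], false) l =
          if PySem.Str.isIn "Beginning reach" l = true then (logs, ([] : List String), true)
          else (logs, ([] : List String), false) := by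
        simp only [pvStepA, Bool.not_false, Bool.true_and, Bool.false_and,
          Bool.false_eq_true, if_false]
      rw [hstep]
      by_cases hb : PySem.Str.isIn "Beginning reach" l = true
      · rw [if_pos hb, ih.2, pvSeekBegin, if_pos hb]
      · rw [if_neg hb, ih.1, pvSeekBegin, if_neg hb]
    · rw [List.foldl_cons]
      have hstep : pvStepA (logs, buf, true) l =
          if PySem.Str.isIn "Reach finished" l = true then
            (logs ++ [("SUCCEEDED", PySem.Str.join "\n" buf)], ([] : List String), false)
          else (logs, buf ++ [pvLinePayload l], true) := by
        simp only [pvStepA, Bool.not_true, Bool.false_and, Bool.true_and,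
          Bool.false_eq_true, if_false, if_true]
      rw [hstep]
      by_cases hf : PySem.Str.isIn "Reach finished" l = true
      · rw [if_pos hf, ih.1, pvCollect, if_pos hf, List.append_assoc]
        rfl
      · rw [if_neg hf, ih.2, pvCollect, if_neg hf]

-- ===== VERDICT (by name: the statement is the Claim_ definition above) =====
theorem extract_reach_logs_spec : Claim_equal_extract_reach_logs := by
  intro log_str _ _
  show extract_reach_logs log_str = extract_reach_logs_alt log_str
  unfold extract_reach_logs extract_reach_logs_alt
  simpa using (pvFoldA_eq (PySem.Str.splitlines log_str)).1 []
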